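-- pv_equiv track=rewrite | github.com/ArthurWalker/Tech-Interview-Prep | Stripe/Exercises/penaltyshop.py | penatly_shop
-- ===== SOURCE A (Python) =====
-- def penatly_shop(customers: str) -> int:
--     # Condition to calculate penalty:
--     # if customer[i] == 'Y' while i is closed => Penalty
--     # if customer[i] == 'N' while i is open => Penalty
--
--     close_dict = {}
--     for close_time in range(0,len(customers)+1):
--         penalty = 0
--         for ind, cust_come in enumerate(customers):
--             if (ind >= close_time and cust_come =='Y') or (ind < close_time and cust_come =='N'):
--                 penalty +=1
--         close_dict[close_time] = penalty
--
--     min_time = min(close_dict.values())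
--     for k,v in close_dict.items():
--         if v == min_time:
--             return k
--     return 0
-- ===== SOURCE B (Python) =====
-- def penatly_shop(customers: str) -> int:
--     # One pass: penalty(0) = number of 'Y'; closing one step later turns one
--     # char from "closed" to "open", changing the penalty by +1 ('N'), -1 ('Y').
--     cur = sum(1 for c in customers if c == 'Y')   # penalty for close_time 0
--     best_t, best_v = 0, cur
--     i = 0
--     for c in customers:
--         cur += 1 if c == 'N' else (-1 if c == 'Y' else 0)
--         i += 1
--         if cur < best_v:
--             best_t, best_v = i, cur
--     return best_t
-- ===== Notes on version B (the rewrite author's own statement) =====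
-- stated objective: faster
-- what changed: B replaces A's per-close-time rescan of the whole string (and the dict of all penalties) by a single incremental pass: start from the penalty of closing immediately, update the penalty by +1/-1 per character, and track the first minimum on the fly.
import Mathlib
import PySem

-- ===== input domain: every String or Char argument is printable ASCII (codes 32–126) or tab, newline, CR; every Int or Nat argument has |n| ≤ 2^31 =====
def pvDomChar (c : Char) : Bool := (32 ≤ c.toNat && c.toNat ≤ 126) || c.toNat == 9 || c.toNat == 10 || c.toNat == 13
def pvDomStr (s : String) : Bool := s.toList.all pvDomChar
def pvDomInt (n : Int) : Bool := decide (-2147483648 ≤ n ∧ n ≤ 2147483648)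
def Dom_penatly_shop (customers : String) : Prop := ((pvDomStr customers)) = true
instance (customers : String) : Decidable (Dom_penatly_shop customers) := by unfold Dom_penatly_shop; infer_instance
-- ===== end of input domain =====

-- B replaces A's quadratic per-close-time rescan by one incremental pass (faster; asymptotic).


-- ===== PORT A =====
-- inner loop of A: the penalty of one close_time
def penA_penalty (cs : List Char) (close_time : Int) : Int :=
  (PySem.List.enumerate cs).foldl
    (fun penalty p =>
      if (close_time ≤ p.1 ∧ p.2 = 'Y') ∨ (p.1 < close_time ∧ p.2 = 'N')
      then penalty + 1 else penalty) 0

def penatly_shop (customers : String) : Int :=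
  let cs := customers.toList
  let close_dict : PySem.Dict Int Int :=
    (PySem.List.pyRange 0 ((cs.length : Int) + 1)).foldl
      (fun d close_time => d.insert close_time (penA_penalty cs close_time))
      PySem.Dict.empty
  match PySem.List.min? close_dict.values (fun y => y) with
  | none => 0          -- unreachable: range(0, len+1) is nonempty, so min() gets a value
  | some min_time =>
    match close_dict.items.find? (fun p => p.2 == min_time) with
    | some p => p.1
    | none => 0

-- ===== PORT B =====
def penatly_shop_alt (customers : String) : Int :=
  let cs := customers.toList
  let start : Int := cs.foldl (fun a c => if c = 'Y' then a + 1 else a) 0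
  let r := cs.foldl
    (fun (s : Int × Int × Int × Int) c =>
      let cur := s.2.2.1 + (if c = 'N' then (1 : Int) else if c = 'Y' then -1 else 0)
      let i := s.2.2.2 + 1
      if cur < s.2.1 then (i, cur, cur, i) else (s.1, s.2.1, cur, i))
    (0, start, start, 0)
  r.1

-- ===== PRECONDITION & SPEC =====
def Spec_penatly_shop (customers : String) (out : Int) : Prop := out = penatly_shop_alt customers
instance (customers : String) (out : Int) : Decidable (Spec_penatly_shop customers out) := by unfold Spec_penatly_shop; infer_instance

-- ===== CLAIM (what is proved, stated in full; the proofs are below) =====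
def Claim_equal_penatly_shop : Prop := ∀ (customers : String), Dom_penatly_shop customers → Spec_penatly_shop customers (penatly_shop customers)

-- ===== LEMMAS AND PROOFS =====

-- penalty for close_time t: 'N's before t plus 'Y's from t on
def pvPen : List Char → Nat → Int
  | [], _ => 0
  | c :: r, 0 => (if c = 'Y' then 1 else 0) + pvPen r 0
  | c :: r, (t+1) => (if c = 'N' then 1 else 0) + pvPen r t

def pvDelta (c : Char) : Int := if c = 'N' then 1 else if c = 'Y' then -1 else 0

-- first index (counting from s) at which the running value strictly improves on bv
def pvFmin (bt bv s : Int) : List Int → Int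
  | [] => bt
  | v :: vs => if v < bv then pvFmin s v (s+1) vs else pvFmin bt bv (s+1) vs

-- the successive values of B's `cur`
def pvVals (cur : Int) : List Char → List Int
  | [] => []
  | c :: r => (cur + pvDelta c) :: pvVals (cur + pvDelta c) r

lemma pen_foldl (cs : List Char) : ∀ (s t : Nat) (acc : Int),
    (PySem.List.enumerate cs (s : Int)).foldl
      (fun penalty p =>
        if ((t : Int) ≤ p.1 ∧ p.2 = 'Y') ∨ (p.1 < (t : Int) ∧ p.2 = 'N')
        then penalty + 1 else penalty) acc = acc + pvPen cs (t - s) := by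
  induction cs with
  | nil => intro s t acc; simp [PySem.List.enumerate_nil, pvPen]
  | cons c r ih =>
    intro s t acc
    rw [PySem.List.enumerate_cons]
    have hs1 : ((s : Int) + 1) = ((s + 1 : Nat) : Int) := by push_cast; ring
    simp only [List.foldl_cons]
    rw [hs1, ih (s+1) t]
    by_cases h : t ≤ s
    · have h0 : t - s = 0 := by omega
      have h1 : t - (s + 1) = 0 := by omega
      rw [h0, h1]
      have hc : (((t : Int) ≤ (s : Int) ∧ c = 'Y') ∨ ((s : Int) < (t : Int) ∧ c = 'N')) ↔ c = 'Y' := by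
        constructor
        · rintro (⟨_, hy⟩ | ⟨hlt, _⟩); · exact hy
          · exact absurd hlt (by exact_mod_cast Nat.not_lt.mpr h)
        · intro hy; left; exact ⟨by exact_mod_cast h, hy⟩
      by_cases hy : c = 'Y'
      · simp [hc, hy, pvPen, h]
        try ring
      · simp [hy, pvPen]
        exact fun hst => absurd hst (by omega)
    · replace h : s < t := by omega
      have h0 : t - s = (t - s - 1) + 1 := by omega
      have h1 : t - (s + 1) = t - s - 1 := by omega
      rw [h0, h1]
      have hc : (((t : Int) ≤ (s : Int) ∧ c = 'Y') ∨ ((s : Int) < (t : Int) ∧ c = 'N')) ↔ c = 'N' := by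
        constructor
        · rintro (⟨hle, _⟩ | ⟨_, hn⟩)
          · exact absurd hle (by exact_mod_cast Nat.not_le.mpr h)
          · exact hn
        · intro hn; right; exact ⟨by exact_mod_cast h, hn⟩
      by_cases hn : c = 'N'
      · simp [hc, hn, pvPen, h]
        try ring
      · simp [hn, pvPen]
        exact fun hst => absurd hst (by omega)

lemma penA_eq_pvPen (cs : List Char) (t : Nat) : penA_penalty cs (t : Int) = pvPen cs t := by
  have := pen_foldl cs 0 t 0
  simpa [penA_penalty] using this

lemma pvPen_step (cs : List Char) : ∀ (k : Nat) (hk : k < cs.length),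
    pvPen cs (k + 1) = pvPen cs k + pvDelta cs[k] := by
  induction cs with
  | nil => intro k hk; simp at hk
  | cons c r ih =>
    intro k hk
    cases k with
    | zero =>
      simp only [pvPen, List.getElem_cons_zero, pvDelta]
      by_cases hn : c = 'N'
      · have hy : ¬ c = 'Y' := by rw [hn]; decide
        simp [hn, hy]
        ring
      · by_cases hy : c = 'Y' <;> simp [hn, hy] <;> ring
    | succ j =>
      have hj : j < r.length := by simpa using hk
      simp only [pvPen, List.getElem_cons_succ]
      rw [ih j hj]; ring

lemma start_eq (cs : List Char) : ∀ acc : Int,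
    cs.foldl (fun a c => if c = 'Y' then a + 1 else a) acc = acc + pvPen cs 0 := by
  induction cs with
  | nil => intro acc; simp [pvPen]
  | cons c r ih =>
    intro acc
    simp only [List.foldl_cons]
    rw [ih]
    by_cases hy : c = 'Y' <;> simp [pvPen, hy] <;> ring

lemma foldB_eq (cs : List Char) : ∀ (bt bv cur i : Int),
    (cs.foldl
      (fun (s : Int × Int × Int × Int) c =>
        let cur := s.2.2.1 + (if c = 'N' then (1 : Int) else if c = 'Y' then -1 else 0)
        let i := s.2.2.2 + 1
        if cur < s.2.1 then (i, cur, cur, i) else (s.1, s.2.1, cur, i))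
      (bt, bv, cur, i)).1 = pvFmin bt bv (i + 1) (pvVals cur cs) := by
  induction cs with
  | nil => intro bt bv cur i; simp [pvVals, pvFmin]
  | cons c r ih =>
    intro bt bv cur i
    simp only [List.foldl_cons, pvVals, pvFmin, pvDelta]
    by_cases h : cur + (if c = 'N' then (1 : Int) else if c = 'Y' then -1 else 0) < bv
    · simp only [h, if_pos, if_true]
      rw [ih]
    · simp only [h, if_false]
      rw [ih]

lemma vals_eq (full : List Char) : ∀ (m k : Nat), full.length = k + m →
    pvVals (pvPen full k) (full.drop k)
      = (List.range m).map (fun j => pvPen full (k + j + 1)) := by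
  intro m
  induction m with
  | zero =>
    intro k hk
    rw [List.drop_of_length_le (by omega)]
    simp [pvVals]
  | succ m ih =>
    intro k hk
    have hklt : k < full.length := by omega
    have h2 := ih (k + 1) (by omega)
    rw [List.drop_eq_getElem_cons hklt]
    simp only [pvVals]
    rw [← pvPen_step full k hklt, h2, List.range_succ_eq_map, List.map_cons, List.map_map]
    refine List.cons_eq_cons.mpr ⟨by norm_num, ?_⟩
    apply List.map_congr_left
    intro j _
    simp only [Function.comp]
    congr 1
    omega

lemma find_min (vs : List Int) : ∀ (pref1 pref2 : List (Int × Int)) (bt bv s : Int),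
    (∀ p ∈ pref1, bv < p.2) → (∀ p ∈ pref2, bv ≤ p.2) →
    List.find? (fun p => p.2 == vs.foldl min bv)
        ((pref1 ++ (bt, bv) :: pref2) ++ PySem.List.enumerate vs s)
      = some (pvFmin bt bv s vs, vs.foldl min bv) := by
  induction vs with
  | nil =>
    intro pref1 pref2 bt bv s h1 h2
    simp only [List.foldl_nil, PySem.List.enumerate_nil, List.append_nil, pvFmin]
    induction pref1 with
    | nil => simp
    | cons p ps ihp =>
      have hne : (p.2 == bv) = false := by
        have := h1 p (by simp)
        simp [bne_iff_ne]; omega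
      simp only [List.cons_append, List.find?_cons, hne]
      exact ihp (fun q hq => h1 q (by simp [hq]))
  | cons v vs ih =>
    intro pref1 pref2 bt bv s h1 h2
    rw [PySem.List.enumerate_cons]
    simp only [List.foldl_cons, pvFmin]
    by_cases hv : v < bv
    · have hmin : min bv v = v := by omega
      rw [hmin, if_pos hv]
      have := ih (pref1 ++ (bt, bv) :: pref2) [] s v (s + 1)
        (by intro p hp
            rcases List.mem_append.mp hp with h | h
            · exact lt_trans hv (h1 p h)
            · rcases List.mem_cons.mp h with rfl | h
              · exact hv
              · exact lt_of_lt_of_le hv (h2 p h))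
        (by intro p hp; simp at hp)
      simpa [List.append_assoc] using this
    · have hmin : min bv v = bv := by omega
      rw [hmin, if_neg hv]
      have := ih pref1 (pref2 ++ [(s, v)]) bt bv (s + 1)
        h1
        (by intro p hp
            rcases List.mem_append.mp hp with h | h
            · exact h2 p h
            · simp at hp ⊢
              rcases List.mem_singleton.mp h with rfl
              simpa using Int.not_lt.mp hv)
      simpa [List.append_assoc] using this

-- shape of A's item list: head plus an enumerate-from-1 of the remaining penalties
lemma enum_shape (f : Nat → Int) (n : Nat) :
    (List.range (n + 1)).map (fun (j : Nat) => ((j : Int), f j))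
      = ((0 : Int), f 0) :: PySem.List.enumerate ((List.range n).map (fun j => f (j + 1))) 1 := by
  have key : ∀ (m s : Nat), PySem.List.enumerate ((List.range m).map (fun j => f (s + j))) (s : Int)
      = (List.range m).map (fun j => (((s + j : Nat) : Int), f (s + j))) := by
    intro m
    induction m with
    | zero => intro s; simp [PySem.List.enumerate_nil]
    | succ m ih =>
      intro s
      rw [List.range_succ_eq_map, List.map_cons, List.map_cons, List.map_map, List.map_map]
      rw [PySem.List.enumerate_cons]
      have hc1 : ((fun j => f (s + j)) ∘ Nat.succ) = fun j => f ((s + 1) + j) := by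
        funext j; simp only [Function.comp]; congr 1; omega
      have hc2 : ((fun j => (((s + j : Nat) : Int), f (s + j))) ∘ Nat.succ)
          = fun j => ((((s + 1) + j : Nat) : Int), f ((s + 1) + j)) := by
        funext j; simp only [Function.comp]
        have h : s + Nat.succ j = (s + 1) + j := by omega
        rw [h]
      rw [hc1, hc2]
      have hs : ((s : Int) + 1) = ((s + 1 : Nat) : Int) := by push_cast; ring
      rw [hs, ih (s + 1)]
      congr 1
  have h0 := key (n + 1) 0
  simp only [Nat.zero_add] at h0
  rw [← h0]
  rw [List.range_succ_eq_map, List.map_cons, PySem.List.enumerate_cons, List.map_map]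
  norm_num
  congr 1

-- ===== VERDICT (by name: the statement is the Claim_ definition above) =====
theorem penatly_shop_spec : Claim_equal_penatly_shop := by
  unfold Claim_equal_penatly_shop
  intro customers _
  unfold Spec_penatly_shop
  simp only [penatly_shop, penatly_shop_alt]
  generalize customers.toList = cs
  have hrange : PySem.List.pyRange 0 ((cs.length : Int) + 1)
      = (List.range (cs.length + 1)).map (fun (k : Nat) => (k : Int)) := by
    have h := PySem.List.pyRange_zero_natCast (cs.length + 1)
    push_cast at h
    exact h
  rw [hrange, List.foldl_map]
  simp only [PySem.Dict.values]
  rw [PySem.Dict.items_foldl_insert_fresh (List.range (cs.length + 1))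
      (fun (j : Nat) => (j : Int)) (fun j => penA_penalty cs (j : Int)) PySem.Dict.empty
      (fun a _ => PySem.Dict.contains_empty _)
      (List.Nodup.map Nat.cast_injective List.nodup_range)]
  simp only [PySem.Dict.empty, List.nil_append, penA_eq_pvPen]
  rw [enum_shape (fun j => pvPen cs j) cs.length]
  simp only [List.map_cons, PySem.List.map_snd_enumerate]
  rw [PySem.List.min?_id_cons]
  dsimp only
  have hfind := find_min ((List.range cs.length).map (fun j => pvPen cs (j + 1))) [] [] 0
      (pvPen cs 0) 1 (by simp) (by simp)
  simp only [List.nil_append, List.cons_append] at hfind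
  rw [hfind]
  dsimp only
  rw [start_eq cs 0, zero_add, foldB_eq]
  have hv := vals_eq cs cs.length 0 (by omega)
  simp only [List.drop_zero, Nat.zero_add] at hv
  rw [hv]
  norm_num
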